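-- pv_equiv track=rewrite | github.com/Hyuoo/ReZeroPS | PS/programmers/L2/p142085.py | solution
-- ===== SOURCE A (Python) =====
-- import heapq
--
-- def solution(n, k, enemy):
--     #if k>len(enemy):
--     #    k = len(enemy)
--
--     kk = [0]*k #enemy[:k]
--     k_sum = n #n+sum(kk)
--     enemy_sum = 0 #sum(enemy[:k])
--     clear = 0 #k
--
--     for i in enemy: #enemy[k:]:
--         enemy_sum += i
--         k_sum += i
--         heapq.heappush(kk,i)
--         k_sum -= heapq.heappop(kk)
--         if k_sum >= enemy_sum:
--             clear+=1
--         else: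
--             break
--
--     return clear
-- ===== SOURCE B (Python) =====
-- def solution(n, k, enemy):
--     # Fixed-size skip-slot list holding the k largest damages seen so far,
--     # plus a running total of damage actually taken.
--     slots = [0] * k
--     taken = 0
--     clear = 0
--     for i in enemy:
--         if slots:
--             m = min(slots)
--             if i > m:
--                 slots[slots.index(m)] = i
--                 taken += m
--             else:
--                 taken += i
--         else:
--             taken += i
--         if taken <= n:
--             clear += 1
--         else:
--             break
--     return clear
-- ===== Notes on version B (the rewrite author's own statement) =====
-- stated objective: simpler
-- what changed: Replaces the heap plus two parallel running sums (k_sum vs enemy_sum) by a plain fixed-size list of the k largest damages with linear min-search and a single running 'taken' total compared against n.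
import Mathlib
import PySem

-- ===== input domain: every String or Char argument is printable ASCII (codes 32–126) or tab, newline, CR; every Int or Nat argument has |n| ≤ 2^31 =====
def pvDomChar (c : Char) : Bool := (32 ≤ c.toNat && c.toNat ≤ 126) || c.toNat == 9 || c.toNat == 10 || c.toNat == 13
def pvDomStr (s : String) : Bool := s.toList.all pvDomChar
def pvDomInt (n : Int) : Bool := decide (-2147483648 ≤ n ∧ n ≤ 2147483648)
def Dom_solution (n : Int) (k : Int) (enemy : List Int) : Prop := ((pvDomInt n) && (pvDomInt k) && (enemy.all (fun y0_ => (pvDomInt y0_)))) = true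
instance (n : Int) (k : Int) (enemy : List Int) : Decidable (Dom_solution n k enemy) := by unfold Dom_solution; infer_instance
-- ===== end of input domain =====

-- B replaces A's heap and dual running sums by a fixed-size list of the k largest
-- damages with linear min-search and one running 'taken' total (objective: simpler).

-- ===== PORT A =====
-- heapq is modelled by its value contract: heappush appends the value to the heap's
-- contents, heappop removes and returns the minimum element (exact for Int values,
-- where only the multiset of heap contents determines every popped value).
def solGo (enemy kk : List Int) (ksum esum clear : Int) : Int :=
  match enemy with
  | [] => clear
  | i :: rest =>
    let esum1 := esum + i
    let ksum1 := ksum + i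
    let kk1 := kk ++ [i]                       -- heapq.heappush(kk, i)
    match kk1.min? with                        -- heapq.heappop(kk): the minimum …
    | none => clear                            -- unreachable: kk1 ≠ []
    | some m =>
      let ksum2 := ksum1 - m
      let kk2 := kk1.erase m                   -- … is removed from the heap
      if ksum2 ≥ esum1 then solGo rest kk2 ksum2 esum1 (clear + 1) else clear

def solution (n : Int) (k : Int) (enemy : List Int) : Int :=
  solGo enemy (List.replicate k.toNat 0) n 0 0

-- ===== PORT B =====
-- slots[slots.index(m)] = i : replace the first occurrence of m by i
def repl (m i : Int) : List Int → List Int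
  | [] => []
  | x :: xs => if x = m then i :: xs else x :: repl m i xs

def altGo (n : Int) (enemy slots : List Int) (taken clear : Int) : Int :=
  match enemy with
  | [] => clear
  | i :: rest =>
    match PySem.List.min? slots (fun y => y) with   -- if slots: m = min(slots)
    | some m =>
      if i > m then
        let taken1 := taken + m
        if taken1 ≤ n then altGo n rest (repl m i slots) taken1 (clear + 1) else clear
      else
        let taken1 := taken + i
        if taken1 ≤ n then altGo n rest slots taken1 (clear + 1) else clear
    | none =>                                       -- else branch: slots is empty
      let taken1 := taken + i
      if taken1 ≤ n then altGo n rest slots taken1 (clear + 1) else clear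

def solution_alt (n : Int) (k : Int) (enemy : List Int) : Int :=
  altGo n enemy (List.replicate k.toNat 0) 0 0

-- ===== PRECONDITION & SPEC =====
def Spec_solution (n : Int) (k : Int) (enemy : List Int) (out : Int) : Prop := out = solution_alt n k enemy
instance (n : Int) (k : Int) (enemy : List Int) (out : Int) : Decidable (Spec_solution n k enemy out) := by unfold Spec_solution; infer_instance

-- ===== CLAIM (what is proved, stated in full; the proofs are below) =====
def Claim_equal_solution : Prop := ∀ (n : Int) (k : Int) (enemy : List Int), Dom_solution n k enemy → Spec_solution n k enemy (solution n k enemy)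

-- ===== LEMMAS AND PROOFS =====

theorem foldl_min_mem (xs : List Int) : ∀ x : Int, xs.foldl min x ∈ x :: xs := by
  induction xs with
  | nil => intro x; simp
  | cons y ys ih =>
    intro x
    simp only [List.foldl_cons]
    rcases le_total x y with hle | hle
    · rw [min_eq_left hle]
      rcases List.mem_cons.mp (ih x) with h1 | h1 <;> simp [h1]
    · rw [min_eq_right hle]
      rcases List.mem_cons.mp (ih y) with h1 | h1 <;> simp [h1]

theorem foldl_min_le (xs : List Int) : ∀ x b : Int, b ∈ x :: xs → xs.foldl min x ≤ b := by
  induction xs with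
  | nil => intro x b hb; simp at hb; simp [hb]
  | cons y ys ih =>
    intro x b hb
    simp only [List.foldl_cons]
    have hx : ys.foldl min (min x y) ≤ min x y := ih (min x y) (min x y) (by simp)
    rcases List.mem_cons.mp hb with h1 | h1
    · rw [h1]; exact le_trans hx (min_le_left _ _)
    · rcases List.mem_cons.mp h1 with h2 | h2
      · rw [h2]; exact le_trans hx (min_le_right _ _)
      · exact ih (min x y) b (by simp [h2])

theorem foldl_min_perm {x y : Int} {xs ys : List Int}
    (h : (x :: xs).Perm (y :: ys)) : xs.foldl min x = ys.foldl min y := by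
  apply le_antisymm
  · exact foldl_min_le xs x _ (h.symm.mem_iff.mp (foldl_min_mem ys y))
  · exact foldl_min_le ys y _ (h.mem_iff.mp (foldl_min_mem xs x))

theorem erase_concat_self_perm (l : List Int) (a : Int) : ((l ++ [a]).erase a).Perm l := by
  by_cases h : a ∈ l
  · rw [List.erase_append_left _ h]
    exact ((List.perm_append_singleton a _).trans (List.perm_cons_erase h).symm)
  · rw [List.erase_append_right _ h]
    simp

theorem repl_perm (i : Int) : ∀ (l : List Int) (m : Int), m ∈ l → (repl m i l).Perm (i :: l.erase m) := by
  intro l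
  induction l with
  | nil => intro m hm; simp at hm
  | cons x xs ih =>
    intro m hm
    by_cases hx : x = m
    · subst hx
      simp [repl, List.erase_cons_head]
    · have hm' : m ∈ xs := by
        rcases List.mem_cons.mp hm with h | h
        · exact absurd h.symm hx
        · exact h
      have : (x :: xs).erase m = x :: xs.erase m := List.erase_cons_tail (by simp [hx])
      rw [this]
      simp only [repl, if_neg hx]
      exact ((ih m hm').cons x).trans (List.Perm.swap i x _)

theorem go_eq (n : Int) : ∀ (enemy kk slots : List Int) (ksum esum taken clear : Int),
    kk.Perm slots → ksum - esum = n - taken →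
    solGo enemy kk ksum esum clear = altGo n enemy slots taken clear := by
  intro enemy
  induction enemy with
  | nil => intro kk slots ksum esum taken clear _ _; simp [solGo, altGo]
  | cons i rest ih =>
    intro kk slots ksum esum taken clear hperm hinv
    rcases slots with _ | ⟨y, ys⟩
    · -- slots empty, hence kk empty
      have hkk : kk = [] := hperm.eq_nil
      subst hkk
      have hA : ([i] : List Int).min? = some i := by simp [List.min?]
      have hB : PySem.List.min? ([] : List Int) (fun y => y) = none := by
        simp [PySem.List.min?]
      simp only [solGo, altGo, List.nil_append, hA, hB, List.erase_cons_head]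
      by_cases hc : taken + i ≤ n
      · rw [if_pos (show ksum + i - i ≥ esum + i by omega), if_pos hc]
        exact ih [] [] _ _ _ _ (List.Perm.refl _) (by omega)
      · rw [if_neg (show ¬ ksum + i - i ≥ esum + i by omega), if_neg hc]
    · -- slots nonempty, hence kk nonempty
      rcases kk with _ | ⟨x, xs⟩
      · exact absurd hperm.symm.eq_nil (by simp)
      have hmk : xs.foldl min x = ys.foldl min y := foldl_min_perm hperm
      have hms_mem : ys.foldl min y ∈ y :: ys := foldl_min_mem ys y
      have hms_memk : ys.foldl min y ∈ x :: xs := hperm.symm.mem_iff.mp hms_mem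
      have hminA : ((x :: xs) ++ [i]).min? = some (min (ys.foldl min y) i) := by
        simp [List.min?, List.foldl_append, hmk]
      have hminB : PySem.List.min? (y :: ys) (fun y => y) = some (ys.foldl min y) :=
        PySem.List.min?_id_cons y ys
      simp only [solGo, altGo, hminA, hminB]
      by_cases hgt : i > ys.foldl min y
      · -- A pops the old minimum; B replaces it by i
        have hmin : min (ys.foldl min y) i = ys.foldl min y :=
          min_eq_left (le_of_lt hgt)
        have herase : ((x :: xs) ++ [i]).erase (ys.foldl min y)
            = (x :: xs).erase (ys.foldl min y) ++ [i] :=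
          List.erase_append_left _ hms_memk
        have hp2 : (((x :: xs) ++ [i]).erase (min (ys.foldl min y) i)).Perm
            (repl (ys.foldl min y) i (y :: ys)) := by
          rw [hmin, herase]
          exact ((List.perm_append_singleton i _).trans
            ((hperm.erase (ys.foldl min y)).cons i)).trans
            (repl_perm i _ _ hms_mem).symm
        rw [if_pos hgt]
        by_cases hc : taken + ys.foldl min y ≤ n
        · rw [if_pos (show ksum + i - min (ys.foldl min y) i ≥ esum + i by
              rw [hmin]; omega), if_pos hc]
          exact ih _ _ _ _ _ _ hp2 (by rw [hmin]; omega)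
        · rw [if_neg (show ¬ ksum + i - min (ys.foldl min y) i ≥ esum + i by
              rw [hmin]; omega), if_neg hc]
      · -- A pops i itself; B takes i and leaves the slots unchanged
        have hmin : min (ys.foldl min y) i = i := min_eq_right (by omega)
        have hp2 : (((x :: xs) ++ [i]).erase (min (ys.foldl min y) i)).Perm (y :: ys) := by
          rw [hmin]
          exact (erase_concat_self_perm _ i).trans hperm
        rw [if_neg hgt]
        by_cases hc : taken + i ≤ n
        · rw [if_pos (show ksum + i - min (ys.foldl min y) i ≥ esum + i by
              rw [hmin]; omega), if_pos hc]
          exact ih _ _ _ _ _ _ hp2 (by rw [hmin]; omega)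
        · rw [if_neg (show ¬ ksum + i - min (ys.foldl min y) i ≥ esum + i by
              rw [hmin]; omega), if_neg hc]

-- ===== VERDICT (by name: the statement is the Claim_ definition above) =====
theorem solution_spec : Claim_equal_solution := by
  intro n k enemy _
  unfold Spec_solution solution solution_alt
  exact go_eq n enemy _ _ n 0 0 0 (List.Perm.refl _) (by omega)
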